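-- pv_equiv track=rewrite | github.com/Pawan70056/DSA-CourseWork- | Question no 1/EngineBuilding.py | min_build_time
-- ===== SOURCE A (Python) =====
-- import heapq
--
-- def min_build_time(engines, split_time):
--     engine_queue = list(engines)
--     heapq.heapify(engine_queue)
--
--     while len(engine_queue) > 1:
--         fastest_engine = heapq.heappop(engine_queue)
--         second_fastest_engine = heapq.heappop(engine_queue)
--         heapq.heappush(engine_queue, second_fastest_engine + split_time)
--
--     return heapq.heappop(engine_queue)
-- ===== SOURCE B (Python) =====
-- def min_build_time(engines, split_time):
--     # Sort once, then a linear two-queue merge: engine values are consumed from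
--     # the sorted queue, generated values are appended to a FIFO queue (they are
--     # produced in nondecreasing order), so the two smallest available values
--     # are always at the queue fronts and no heap is needed.
--     eng = sorted(engines)
--     gen = []
--     i = 0
--     j = 0
--     while (len(eng) - i) + (len(gen) - j) > 1:
--         if j >= len(gen) or (i < len(eng) and eng[i] <= gen[j]):
--             first = eng[i]; i += 1
--         else:
--             first = gen[j]; j += 1
--         if j >= len(gen) or (i < len(eng) and eng[i] <= gen[j]):
--             second = eng[i]; i += 1
--         else:
--             second = gen[j]; j += 1
--         gen.append(second + split_time)
--     if i < len(eng):
--         return eng[i]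
--     return gen[j]
-- ===== Notes on version B (the rewrite author's own statement) =====
-- stated objective: alternative
-- what changed: replaces the binary heap with one upfront sort plus a linear two-queue merge: newly generated values are appended to a FIFO queue (they are produced in nondecreasing order), so each round pops the two smallest values by comparing the two queue fronts instead of sifting a heap
import Mathlib
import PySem

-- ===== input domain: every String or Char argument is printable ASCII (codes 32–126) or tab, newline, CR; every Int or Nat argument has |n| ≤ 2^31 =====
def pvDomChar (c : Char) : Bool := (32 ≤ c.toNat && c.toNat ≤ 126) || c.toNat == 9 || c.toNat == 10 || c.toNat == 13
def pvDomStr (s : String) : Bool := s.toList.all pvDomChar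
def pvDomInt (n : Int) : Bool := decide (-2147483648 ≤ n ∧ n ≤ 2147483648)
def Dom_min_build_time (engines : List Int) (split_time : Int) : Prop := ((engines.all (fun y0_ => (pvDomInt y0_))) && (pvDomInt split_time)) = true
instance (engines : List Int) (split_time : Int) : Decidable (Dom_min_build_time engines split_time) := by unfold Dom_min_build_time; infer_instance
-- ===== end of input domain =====

-- B replaces the heap with one upfront sort plus a linear two-queue merge
-- (generated values arise in nondecreasing order), trading heap sifting for
-- constant-time front comparisons; alternative algorithm of the same cost.

-- ===== PORT A =====
-- heapq heap modelled by the multiset of its elements: heappop returns the minimum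
-- value and removes its first occurrence; exact for the returned value.
def pvHeapPop (l : List Int) : Int × List Int :=
  match PySem.List.min? l (fun x => x) with
  | none => (0, [])   -- heappop on an empty heap raises IndexError (excluded by Pre_)
  | some m => (m, (PySem.List.remove? l m).getD [])

-- the while loop; each iteration shortens the heap by one, so length is enough fuel
def pvHeapLoop (s : Int) : Nat → List Int → List Int
  | 0, l => l
  | fuel + 1, l =>
    if 1 < l.length then
      let p1 := pvHeapPop l
      let p2 := pvHeapPop p1.2
      pvHeapLoop s fuel (p2.2 ++ [p2.1 + s])
    else l

def min_build_time (engines : List Int) (split_time : Int) : Int :=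
  match PySem.List.min? (pvHeapLoop split_time engines.length engines) (fun x => x) with
  | none => 0        -- final heappop on an empty heap raises (excluded by Pre_)
  | some m => m

-- ===== PORT B =====
-- the index pointers i, j of Source B are modelled by the not-yet-consumed suffixes
-- eng[i:], gen[j:]; one front pop ('if j >= len(gen) or (i < len(eng) and eng[i] <= gen[j])'):
def pvPopQ (e g : List Int) : Int × List Int × List Int :=
  match e, g with
  | e, [] => (e.headD 0, e.tail, [])   -- eng[i] with both queues empty raises (unreachable inside the loop)
  | [], y :: g' => (y, [], g')
  | x :: e', y :: g' => if x ≤ y then (x, e', y :: g') else (y, x :: e', g')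

-- the while loop; each iteration removes one value in total, so length is enough fuel
def pvTwoQLoop (s : Int) : Nat → List Int → List Int → List Int × List Int
  | 0, e, g => (e, g)
  | fuel + 1, e, g =>
    if 1 < e.length + g.length then
      let p1 := pvPopQ e g
      let p2 := pvPopQ p1.2.1 p1.2.2
      pvTwoQLoop s fuel p2.2.1 (p2.2.2 ++ [p2.1 + s])
    else (e, g)

def min_build_time_alt (engines : List Int) (split_time : Int) : Int :=
  let r := pvTwoQLoop split_time engines.length
    (PySem.List.sorted engines (fun x => x) false) []
  match r.1 with
  | x :: _ => x
  | [] => r.2.headD 0   -- gen[j] on an empty queue raises IndexError (excluded by Pre_)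

-- ===== PRECONDITION & SPEC =====
-- A (and B) raise IndexError on an empty engine list; nothing else is excluded.
def Pre_min_build_time (engines : List Int) (split_time : Int) : Prop := engines ≠ []
instance (engines : List Int) (split_time : Int) : Decidable (Pre_min_build_time engines split_time) := by unfold Pre_min_build_time; infer_instance

def pvWitness_min_build_time : List Int × Int := ([3, 1, 2], 4)

def Spec_min_build_time (engines : List Int) (split_time : Int) (out : Int) : Prop := out = min_build_time_alt engines split_time
instance (engines : List Int) (split_time : Int) (out : Int) : Decidable (Spec_min_build_time engines split_time out) := by unfold Spec_min_build_time; infer_instance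

-- ===== CLAIM (what is proved, stated in full; the proofs are below) =====
def Claim_equal_min_build_time : Prop := ∀ (engines : List Int) (split_time : Int), Dom_min_build_time engines split_time → Pre_min_build_time engines split_time → Spec_min_build_time engines split_time (min_build_time engines split_time)

-- ===== LEMMAS AND PROOFS =====

-- min? (identity key) is characterised by membership and minimality of the value
lemma pv_min?_eq {la : List Int} {m : Int} (hmem : m ∈ la)
    (hmin : ∀ w ∈ la, m ≤ w) :
    PySem.List.min? la (fun v => v) = some m := by
  cases hm : PySem.List.min? la (fun v => v) with
  | none =>
      have : la = [] := (PySem.List.min?_eq_none_iff la (fun v => v)).mp hm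
      subst this; simp at hmem
  | some m' =>
      have h1 : m' ≤ m := PySem.List.min?_isMin hm m hmem
      have h2 : m ≤ m' := hmin m' (PySem.List.min?_mem hm)
      have : m' = m := le_antisymm h1 h2
      simp [this]

-- one heappop, computed: returns the minimum value and erases one occurrence of it
lemma pv_heapPop_eq {la : List Int} {m : Int} {r : List Int}
    (hp : la.Perm (m :: r)) (hmin : ∀ w ∈ la, m ≤ w) :
    pvHeapPop la = (m, la.erase m) ∧ (la.erase m).Perm r := by
  have hmem : m ∈ la := hp.mem_iff.mpr (by simp)
  have hmin? := pv_min?_eq hmem hmin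
  refine ⟨by simp [pvHeapPop, hmin?, PySem.List.remove?_eq_some_erase la m hmem], ?_⟩
  have h1 : la.Perm (m :: la.erase m) := List.perm_cons_erase hmem
  exact (List.perm_cons m).mp (h1.symm.trans hp)

-- a front pop takes the head of one of the two queues and keeps the other
lemma pv_popQ_struct {e g : List Int} {m : Int} {e1 g1 : List Int}
    (hP : pvPopQ e g = (m, e1, g1)) (hne : e ++ g ≠ []) :
    (e = m :: e1 ∧ g1 = g) ∨ (g = m :: g1 ∧ e1 = e) := by
  rcases e with _ | ⟨x, e'⟩ <;> rcases g with _ | ⟨y, g'⟩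
  · simp at hne
  · have hP' : (y, ([] : List Int), g') = (m, e1, g1) := hP
    injection hP' with h1 h2; injection h2 with h2 h3
    subst h1; subst h2; subst h3
    exact Or.inr ⟨rfl, rfl⟩
  · have hP' : (x, e', ([] : List Int)) = (m, e1, g1) := hP
    injection hP' with h1 h2; injection h2 with h2 h3
    subst h1; subst h2; subst h3
    exact Or.inl ⟨rfl, rfl⟩
  · by_cases h : x ≤ y
    · have hP' : (x, e', y :: g') = (m, e1, g1) := by rw [← hP]; simp [pvPopQ, h]
      injection hP' with h1 h2; injection h2 with h2 h3
      subst h1; subst h2; subst h3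
      exact Or.inl ⟨rfl, rfl⟩
    · have hP' : (y, x :: e', g') = (m, e1, g1) := by rw [← hP]; simp [pvPopQ, h]
      injection hP' with h1 h2; injection h2 with h2 h3
      subst h1; subst h2; subst h3
      exact Or.inr ⟨rfl, rfl⟩

-- with both queues sorted, a front pop returns the global minimum
lemma pv_popQ_min {e g : List Int} {m : Int} {e1 g1 : List Int}
    (hP : pvPopQ e g = (m, e1, g1))
    (he : e.Pairwise (· ≤ ·)) (hg : g.Pairwise (· ≤ ·)) :
    ∀ w ∈ e ++ g, m ≤ w := by
  rcases e with _ | ⟨x, e'⟩ <;> rcases g with _ | ⟨y, g'⟩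
  · simp
  · have hP' : (y, ([] : List Int), g') = (m, e1, g1) := hP
    injection hP' with h1 h2
    subst h1
    intro w hw
    rcases List.mem_cons.mp (by simpa using hw) with rfl | hw1
    · omega
    · exact (List.pairwise_cons.mp hg).1 w hw1
  · have hP' : (x, e', ([] : List Int)) = (m, e1, g1) := hP
    injection hP' with h1 h2
    subst h1
    intro w hw
    rcases List.mem_cons.mp (by simpa using hw) with rfl | hw1
    · omega
    · exact (List.pairwise_cons.mp he).1 w hw1
  · by_cases h : x ≤ y
    · have hP' : (x, e', y :: g') = (m, e1, g1) := by rw [← hP]; simp [pvPopQ, h]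
      injection hP' with h1 h2
      subst h1
      intro w hw
      rcases List.mem_append.mp hw with hw1 | hw1
      · rcases List.mem_cons.mp hw1 with rfl | hw2
        · omega
        · exact (List.pairwise_cons.mp he).1 w hw2
      · rcases List.mem_cons.mp hw1 with rfl | hw2
        · exact h
        · exact le_trans h ((List.pairwise_cons.mp hg).1 w hw2)
    · have hP' : (y, x :: e', g') = (m, e1, g1) := by rw [← hP]; simp [pvPopQ, h]
      injection hP' with h1 h2
      subst h1
      have hyx : y ≤ x := (not_le.mp h).le
      intro w hw
      rcases List.mem_append.mp hw with hw1 | hw1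
      · rcases List.mem_cons.mp hw1 with rfl | hw2
        · exact hyx
        · exact le_trans hyx ((List.pairwise_cons.mp he).1 w hw2)
      · rcases List.mem_cons.mp hw1 with rfl | hw2
        · omega
        · exact (List.pairwise_cons.mp hg).1 w hw2

-- a front pop removes exactly one occurrence of the popped value (as a multiset)
lemma pv_popQ_perm {e g : List Int} {m : Int} {e1 g1 : List Int}
    (hP : pvPopQ e g = (m, e1, g1)) (hne : e ++ g ≠ []) :
    (e ++ g).Perm (m :: (e1 ++ g1)) := by
  rcases pv_popQ_struct hP hne with ⟨h1, h2⟩ | ⟨h1, h2⟩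
  · subst h2; rw [h1]; exact List.Perm.refl _
  · subst h2; rw [h1]; exact List.perm_middle

-- a front pop keeps both queues sorted
lemma pv_popQ_sorted {e g : List Int} {m : Int} {e1 g1 : List Int}
    (hP : pvPopQ e g = (m, e1, g1)) (hne : e ++ g ≠ [])
    (he : e.Pairwise (· ≤ ·)) (hg : g.Pairwise (· ≤ ·)) :
    e1.Pairwise (· ≤ ·) ∧ g1.Pairwise (· ≤ ·) := by
  rcases pv_popQ_struct hP hne with ⟨h1, h2⟩ | ⟨h1, h2⟩
  · subst h2; exact ⟨(List.pairwise_cons.mp (h1 ▸ he)).2, hg⟩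
  · subst h2; exact ⟨he, (List.pairwise_cons.mp (h1 ▸ hg)).2⟩

-- if every current value except the last generated one is ≥ b, the next
-- second-pop is still ≥ b
lemma pv_secondpop_lb {e g : List Int} {b v : Int}
    (he : e.Pairwise (· ≤ ·)) (hg : (g ++ [v]).Pairwise (· ≤ ·))
    (hbe : ∀ w ∈ e, b ≤ w) (hbg : ∀ w ∈ g, b ≤ w)
    (hlen : 2 ≤ e.length + (g ++ [v]).length) :
    b ≤ (pvPopQ (pvPopQ e (g ++ [v])).2.1 (pvPopQ e (g ++ [v])).2.2).1 := by
  rcases hQ1 : pvPopQ e (g ++ [v]) with ⟨n1, E1, G1⟩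
  have hneQ : e ++ (g ++ [v]) ≠ [] := by simp
  have hmin1 : ∀ w ∈ e ++ (g ++ [v]), n1 ≤ w := pv_popQ_min hQ1 he hg
  have hn1v : n1 ≤ v := hmin1 v (by simp)
  have hlen1 : 1 ≤ E1.length + G1.length := by
    have hlp := (pv_popQ_perm hQ1 hneQ).length_eq
    simp at hlp ⊢
    have hlenp := hlen
    simp at hlenp
    omega
  have hneQ2 : E1 ++ G1 ≠ [] := by
    intro h
    rcases List.append_eq_nil_iff.mp h with ⟨rfl, rfl⟩
    simp at hlen1
  rcases hQ2 : pvPopQ E1 G1 with ⟨n2, E2, G2⟩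
  show b ≤ n2
  have hn2mem : n2 ∈ E1 ++ G1 := by
    rcases pv_popQ_struct hQ2 hneQ2 with ⟨h1, -⟩ | ⟨h1, -⟩
    · simp [h1]
    · simp [h1]
  rcases pv_popQ_struct hQ1 hneQ with ⟨hE, hG1⟩ | ⟨hG, hE1⟩
  · -- the first pop took the engine front
    have hbn1 : b ≤ n1 := hbe n1 (by simp [hE])
    rcases List.mem_append.mp hn2mem with h | h
    · exact hbe n2 (by rw [hE]; exact List.mem_cons_of_mem _ h)
    · rw [hG1] at h
      rcases List.mem_append.mp h with h1 | h1
      · exact hbg n2 h1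
      · have : n2 = v := by simpa using h1
        omega
  · -- the first pop took the generated front
    subst hE1
    rcases g with _ | ⟨h0, t⟩
    · simp only [List.nil_append] at hG
      injection hG with h1 h2
      subst h2
      rcases List.mem_append.mp hn2mem with h | h
      · exact hbe n2 h
      · simp at h
    · rw [List.cons_append] at hG
      injection hG with h1 h2
      have hbn1 : b ≤ n1 := h1 ▸ hbg h0 (by simp)
      rcases List.mem_append.mp hn2mem with h | h
      · exact hbe n2 h
      · rw [← h2] at h
        rcases List.mem_append.mp h with h1 | h1
        · exact hbg n2 (List.mem_cons_of_mem _ h1)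
        · have : n2 = v := by simpa using h1
          omega

-- the main invariant: A's heap stays a permutation of B's two queues combined,
-- both queues stay sorted, and every generated value is at most (second pop) + s
lemma pv_main (s : Int) :
    ∀ (fuel : Nat) (la e g : List Int),
      la.Perm (e ++ g) →
      e.Pairwise (· ≤ ·) → g.Pairwise (· ≤ ·) →
      (∀ z ∈ g, 2 ≤ e.length + g.length →
        z ≤ (pvPopQ (pvPopQ e g).2.1 (pvPopQ e g).2.2).1 + s) →
      e.length + g.length ≤ fuel + 1 →
      (pvHeapLoop s fuel la).Perm
        ((pvTwoQLoop s fuel e g).1 ++ (pvTwoQLoop s fuel e g).2) ∧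
      (pvTwoQLoop s fuel e g).1.length + (pvTwoQLoop s fuel e g).2.length ≤ 1 := by
  intro fuel
  induction fuel with
  | zero =>
      intro la e g hp he hg hC hfuel
      simp only [pvHeapLoop, pvTwoQLoop]
      exact ⟨hp, by omega⟩
  | succ fuel ih =>
      intro la e g hp he hg hC hfuel
      by_cases hbig : 1 < e.length + g.length
      · have hlen_la : la.length = e.length + g.length := by
          simpa using hp.length_eq
        have hcond : 1 < la.length := by omega
        rcases hP1 : pvPopQ e g with ⟨m1, e1, g1⟩
        have hne1 : e ++ g ≠ [] := by
          intro h
          rcases List.append_eq_nil_iff.mp h with ⟨rfl, rfl⟩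
          simp at hbig
        have perm1 : (e ++ g).Perm (m1 :: (e1 ++ g1)) := pv_popQ_perm hP1 hne1
        have min1 : ∀ w ∈ e ++ g, m1 ≤ w := pv_popQ_min hP1 he hg
        obtain ⟨he1, hg1⟩ := pv_popQ_sorted hP1 hne1 he hg
        obtain ⟨hpopA1, hper1⟩ :=
          pv_heapPop_eq (hp.trans perm1) (fun w hw => min1 w (hp.mem_iff.mp hw))
        have hlen1 : e1.length + g1.length + 1 = e.length + g.length := by
          have := perm1.length_eq; simp at this; omega
        have hne2 : e1 ++ g1 ≠ [] := by
          intro h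
          rcases List.append_eq_nil_iff.mp h with ⟨rfl, rfl⟩
          simp at hlen1; omega
        rcases hP2 : pvPopQ e1 g1 with ⟨m2, e2, g2⟩
        have perm2 : (e1 ++ g1).Perm (m2 :: (e2 ++ g2)) := pv_popQ_perm hP2 hne2
        have min2 : ∀ w ∈ e1 ++ g1, m2 ≤ w := pv_popQ_min hP2 he1 hg1
        obtain ⟨he2, hg2⟩ := pv_popQ_sorted hP2 hne2 he1 hg1
        obtain ⟨hpopA2, hper2⟩ :=
          pv_heapPop_eq (hper1.trans perm2) (fun w hw => min2 w (hper1.mem_iff.mp hw))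
        have hlen2 : e2.length + g2.length + 1 = e1.length + g1.length := by
          have := perm2.length_eq; simp at this; omega
        have hA : pvHeapLoop s (fuel + 1) la
            = pvHeapLoop s fuel ((la.erase m1).erase m2 ++ [m2 + s]) := by
          simp [pvHeapLoop, hcond, hpopA1, hpopA2]
        have hB : pvTwoQLoop s (fuel + 1) e g
            = pvTwoQLoop s fuel e2 (g2 ++ [m2 + s]) := by
          simp [pvTwoQLoop, hbig, hP1, hP2]
        rw [hA, hB]
        -- bound on the current generated values
        have hCg : ∀ z ∈ g, z ≤ m2 + s := by
          intro z hz
          have := hC z hz (by omega)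
          simpa [hP1, hP2] using this
        -- membership transfers
        have hsub2 : ∀ w ∈ e2 ++ g2, w ∈ e1 ++ g1 := fun w hw =>
          perm2.mem_iff.mpr (by simp [hw])
        have hming2 : ∀ w ∈ e2 ++ g2, m2 ≤ w := fun w hw => min2 w (hsub2 w hw)
        have hg2subg : ∀ z ∈ g2, z ∈ g := by
          intro z hz
          have hz1 : z ∈ g1 := by
            rcases pv_popQ_struct hP2 hne2 with ⟨-, h2⟩ | ⟨h2, -⟩
            · exact h2 ▸ hz
            · rw [h2]; exact List.mem_cons_of_mem _ hz
          rcases pv_popQ_struct hP1 hne1 with ⟨-, h2⟩ | ⟨h2, -⟩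
          · exact h2 ▸ hz1
          · rw [h2]; exact List.mem_cons_of_mem _ hz1
        -- the new generated queue is sorted
        have hg2s : (g2 ++ [m2 + s]).Pairwise (· ≤ ·) := by
          rw [List.pairwise_append]
          refine ⟨hg2, by simp, ?_⟩
          intro a ha b hb
          have : b = m2 + s := by simpa using hb
          subst this
          exact hCg a (hg2subg a ha)
        -- the invariant bound for the new state
        have hCnew : ∀ z ∈ g2 ++ [m2 + s],
            2 ≤ e2.length + (g2 ++ [m2 + s]).length →
            z ≤ (pvPopQ (pvPopQ e2 (g2 ++ [m2 + s])).2.1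
                  (pvPopQ e2 (g2 ++ [m2 + s])).2.2).1 + s := by
          intro z hz hlen3
          have hlb := pv_secondpop_lb (v := m2 + s) he2 hg2s
            (fun w hw => hming2 w (List.mem_append.mpr (Or.inl hw)))
            (fun w hw => hming2 w (List.mem_append.mpr (Or.inr hw))) hlen3
          rcases List.mem_append.mp hz with h | h
          · have := hCg z (hg2subg z h)
            omega
          · have : z = m2 + s := by simpa using h
            omega
        -- the new permutation
        have permnew : ((la.erase m1).erase m2 ++ [m2 + s]).Perm
            (e2 ++ (g2 ++ [m2 + s])) := by
          have := hper2.append_right [m2 + s]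
          rw [← List.append_assoc]
          exact this
        exact ih _ e2 (g2 ++ [m2 + s]) permnew he2 hg2s hCnew (by simp; omega)
      · have hncond : ¬ 1 < la.length := by
          have : la.length = e.length + g.length := by simpa using hp.length_eq
          omega
        have hA : pvHeapLoop s (fuel + 1) la = la := by
          simp [pvHeapLoop, hncond]
        have hB : pvTwoQLoop s (fuel + 1) e g = (e, g) := by
          simp [pvTwoQLoop, hbig]
        rw [hA, hB]
        exact ⟨hp, by simp; omega⟩

-- ===== VERDICT (by name: the statement is the Claim_ definition above) =====
theorem min_build_time_spec : Claim_equal_min_build_time := by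
  intro engines split_time _ _
  unfold Spec_min_build_time min_build_time min_build_time_alt
  obtain ⟨hperm, hlen⟩ := pv_main split_time engines.length engines
      (PySem.List.sorted engines (fun x => x) false) []
      (by simpa using (PySem.List.sorted_perm engines (fun x => x) false).symm)
      (by simpa using PySem.List.sorted_pairwise engines (fun x => x))
      List.Pairwise.nil
      (by intro z hz; simp at hz)
      (by simp [PySem.List.length_sorted])
  rcases hres : pvTwoQLoop split_time engines.length
      (PySem.List.sorted engines (fun x => x) false) [] with ⟨re, rg⟩
  rw [hres] at hperm hlen
  rcases re with _ | ⟨x, re2⟩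
  · rcases rg with _ | ⟨y, rg2⟩
    · have hnil : pvHeapLoop split_time engines.length engines = [] := by
        simpa using hperm.eq_nil
      simp [hnil, PySem.List.min?]
    · have hrg2 : rg2 = [] := by simpa using hlen
      subst hrg2
      have hmem : y ∈ pvHeapLoop split_time engines.length engines :=
        hperm.mem_iff.mpr (by simp)
      have hmin : ∀ w ∈ pvHeapLoop split_time engines.length engines, y ≤ w := by
        intro w hw
        have : w ∈ ([] : List Int) ++ [y] := hperm.mem_iff.mp hw
        simp at this; omega
      rw [pv_min?_eq hmem hmin]
      simp
  · have hre2 : re2 = [] ∧ rg = [] := by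
      simp at hlen
      exact ⟨List.length_eq_zero_iff.mp (by omega),
             List.length_eq_zero_iff.mp (by omega)⟩
    obtain ⟨rfl, rfl⟩ := hre2
    have hmem : x ∈ pvHeapLoop split_time engines.length engines :=
      hperm.mem_iff.mpr (by simp)
    have hmin : ∀ w ∈ pvHeapLoop split_time engines.length engines, x ≤ w := by
      intro w hw
      have : w ∈ [x] ++ ([] : List Int) := hperm.mem_iff.mp hw
      simp at this; omega
    rw [pv_min?_eq hmem hmin]
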